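-- pv_equiv track=rewrite | github.com/CASR-HKU/ESDA | software/utils/utils.py | load_components
-- ===== SOURCE A (Python) =====
-- def load_components(comps, model_dicts):
--     if "all" in comps:
--         return model_dicts
--     updated_dict = {}
--     for comp in comps:
--         for k,v in model_dicts.items():
--             if comp in k:
--                 updated_dict[k] = v
--     return updated_dict
-- ===== SOURCE B (Python) =====
-- def load_components(comps, model_dicts):
--     if "all" in comps:
--         return model_dicts
--
--     def go(cs, entries):
--         if not cs:
--             return []
--         c, rest = cs[0], cs[1:]
--         hit = [kv for kv in entries if c in kv[0]]
--         miss = [kv for kv in entries if c not in kv[0]]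
--         return hit + go(rest, miss)
--
--     return dict(go(comps, list(model_dicts.items())))
-- ===== Notes on version B (the rewrite author's own statement) =====
-- stated objective: alternative
-- what changed: A mutates a dict in nested loops (comps outer, full dict rescanned each time, relying on dict-overwrite to dedup entries matching several comps); B is a pure recursion over comps that partitions a shrinking entry list into hit/miss, concatenates the hit blocks, and builds the dict once at the end, so each entry is consumed at its first matching comp and never revisited.
import Mathlib
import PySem

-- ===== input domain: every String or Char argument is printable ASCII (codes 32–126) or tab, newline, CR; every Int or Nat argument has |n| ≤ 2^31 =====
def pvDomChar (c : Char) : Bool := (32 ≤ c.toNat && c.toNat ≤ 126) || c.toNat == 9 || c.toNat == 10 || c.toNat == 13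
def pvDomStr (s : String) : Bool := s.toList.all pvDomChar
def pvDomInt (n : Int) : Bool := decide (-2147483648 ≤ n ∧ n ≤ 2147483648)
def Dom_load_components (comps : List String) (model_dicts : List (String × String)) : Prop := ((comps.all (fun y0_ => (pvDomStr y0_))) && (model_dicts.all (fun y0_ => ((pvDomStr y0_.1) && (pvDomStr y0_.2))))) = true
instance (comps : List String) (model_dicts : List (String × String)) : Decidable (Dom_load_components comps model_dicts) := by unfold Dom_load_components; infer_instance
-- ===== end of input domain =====

-- B replaces A's dict-mutating nested loops (comps outer, whole dict rescanned per comp,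
-- overwrite as dedup) by a pure recursion over comps that partitions a shrinking entry list
-- into hit/miss blocks, concatenates the hits, and builds the dict once at the end.

-- ===== PORT A =====
def load_components (comps : List String) (model_dicts : List (String × String)) : List (String × String) :=
  if comps.contains "all" then model_dicts
  else
    (comps.foldl
      (fun (updated_dict : PySem.Dict String String) comp =>
        model_dicts.foldl
          (fun updated_dict kv =>
            if PySem.Str.isIn comp kv.1 then updated_dict.insert kv.1 kv.2 else updated_dict)
          updated_dict)
      PySem.Dict.empty).items

-- ===== PORT B =====
-- recursive helper 'go' of Source B: partition entries at the head comp, keep the hits, recurse on the misses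
def lcGo : List String → List (String × String) → List (String × String)
  | [], _ => []
  | c :: rest, entries =>
      entries.filter (fun kv => PySem.Str.isIn c kv.1)
        ++ lcGo rest (entries.filter (fun kv => !PySem.Str.isIn c kv.1))

def load_components_alt (comps : List String) (model_dicts : List (String × String)) : List (String × String) :=
  if comps.contains "all" then model_dicts
  else (PySem.Dict.ofList (lcGo comps model_dicts)).items

-- ===== PRECONDITION & SPEC =====
-- Pre_ excludes only association lists with duplicate keys, which do not represent a Python dict
-- (A's parameter model_dicts is a dict, so such inputs never arise on the Python side).
def Pre_load_components (comps : List String) (model_dicts : List (String × String)) : Prop :=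
  (model_dicts.map Prod.fst).Nodup
instance (comps : List String) (model_dicts : List (String × String)) : Decidable (Pre_load_components comps model_dicts) := by unfold Pre_load_components; infer_instance

def pvWitness_load_components : List String × (List (String × String)) :=
  (["conv", "fc"], [("conv1", "a"), ("pool", "b"), ("fc2", "c")])

def Spec_load_components (comps : List String) (model_dicts : List (String × String)) (out : List (String × String)) : Prop := out = load_components_alt comps model_dicts
instance (comps : List String) (model_dicts : List (String × String)) (out : List (String × String)) : Decidable (Spec_load_components comps model_dicts out) := by unfold Spec_load_components; infer_instance

-- ===== CLAIM (what is proved, stated in full; the proofs are below) =====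
def Claim_equal_load_components : Prop := ∀ (comps : List String) (model_dicts : List (String × String)), Dom_load_components comps model_dicts → Pre_load_components comps model_dicts → Spec_load_components comps model_dicts (load_components comps model_dicts)

-- ===== LEMMAS AND PROOFS =====

-- Inserting a key/value pair that is already present (under unique keys) leaves the dict unchanged.
lemma dict_insert_mem_self (d : PySem.Dict String String) (k v : String)
    (hnd : d.keys.Nodup) (hm : (k, v) ∈ d.items) : d.insert k v = d := by
  have hk : d.contains k = true :=
    (PySem.Dict.contains_iff_mem_keys d k).mpr (PySem.Dict.mem_keys_of_mem_items d hm)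
  apply PySem.Dict.ext
  rw [PySem.Dict.items_insert_of_contains d v hk]
  simp only [PySem.Dict.keys] at hnd
  have hcong : ∀ p ∈ d.items, (if (p.1 == k) = true then (k, v) else p) = id p := by
    intro p hp
    by_cases hpk : (p.1 == k) = true
    · have hpk' : p.1 = k := by simpa using hpk
      have : p = (k, v) := List.inj_on_of_nodup_map hnd hp hm (by simpa using hpk')
      simp [this]
    · simp [hpk]
  rw [List.map_congr_left hcong, List.map_id]

-- One inner pass of A over l: exactly the matching entries whose key is not yet present are appended.
lemma foldl_insert_pass (c : String) :
    ∀ (l : List (String × String)) (d : PySem.Dict String String),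
    (l.map Prod.fst).Nodup → d.keys.Nodup →
    (∀ kv ∈ l, PySem.Str.isIn c kv.1 = true → kv ∈ d.items ∨ d.contains kv.1 = false) →
    List.foldl (fun d kv => if PySem.Str.isIn c kv.1 then d.insert kv.1 kv.2 else d) d l
    = List.foldl (fun d kv => d.insert kv.1 kv.2) d
        (l.filter (fun kv => PySem.Str.isIn c kv.1 && !(d.contains kv.1))) := by
  intro l
  induction l with
  | nil => intro d _ _ _; rfl
  | cons kv l' ih =>
    intro d hnd hd hcond
    have hndt : (l'.map Prod.fst).Nodup := (List.nodup_cons.mp (by simpa using hnd)).2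
    have hkvnot : kv.1 ∉ l'.map Prod.fst := (List.nodup_cons.mp (by simpa using hnd)).1
    simp only [List.foldl_cons, List.filter_cons]
    by_cases hi : PySem.Str.isIn c kv.1 = true
    · by_cases hc : d.contains kv.1 = true
      · -- already present with the same value: the insert is a no-op
        have hmem : kv ∈ d.items := by
          rcases hcond kv (List.mem_cons_self) hi with h | h
          · exact h
          · rw [hc] at h; cases h
        have hins : d.insert kv.1 kv.2 = d := dict_insert_mem_self d kv.1 kv.2 hd (by simpa using hmem)
        simp only [hi, if_true, hc, Bool.not_true, Bool.and_false, hins]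
        exact ih d hndt hd (fun x hx h => hcond x (List.mem_cons_of_mem _ hx) h)
      · -- fresh key: it is appended
        have hc' : d.contains kv.1 = false := by
          cases h : d.contains kv.1
          · rfl
          · exact absurd h hc
        have hne : ∀ x ∈ l', (x.1 == kv.1) = false := by
          intro x hx
          have : x.1 ≠ kv.1 := fun h => hkvnot (h ▸ List.mem_map_of_mem hx)
          simpa using this
        have hfc : l'.filter (fun x => PySem.Str.isIn c x.1 && !((d.insert kv.1 kv.2).contains x.1))
            = l'.filter (fun x => PySem.Str.isIn c x.1 && !(d.contains x.1)) := by
          apply List.filter_congr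
          intro x hx
          rw [PySem.Dict.contains_insert d kv.1 x.1 kv.2, hne x hx, Bool.false_or]
        have hcond' : ∀ x ∈ l', PySem.Str.isIn c x.1 = true →
            x ∈ (d.insert kv.1 kv.2).items ∨ (d.insert kv.1 kv.2).contains x.1 = false := by
          intro x hx h
          rcases hcond x (List.mem_cons_of_mem _ hx) h with hmem | hnc
          · left
            rw [PySem.Dict.items_insert_of_not_contains d kv.2 hc']
            exact List.mem_append_left _ hmem
          · right
            rw [PySem.Dict.contains_insert d kv.1 x.1 kv.2, hne x hx, Bool.false_or, hnc]
        simp only [hi, if_true, hc', Bool.not_false, Bool.and_true, List.foldl_cons]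
        rw [ih (d.insert kv.1 kv.2) hndt (PySem.Dict.nodup_keys_insert d kv.1 kv.2 hd) hcond', hfc]
    · have hi' : PySem.Str.isIn c kv.1 = false := by
        cases h : PySem.Str.isIn c kv.1
        · rfl
        · exact absurd h hi
      simp only [hi', Bool.false_and]
      exact ih d hndt hd (fun x hx h => hcond x (List.mem_cons_of_mem _ hx) h)

-- Filtering a Nodup list by membership in a sublist retrieves exactly that sublist.
lemma filter_mem_sublist (p : (String × String) → Bool) :
    ∀ (md rem : List (String × String)), rem.Sublist md → md.Nodup →
    md.filter (fun x => p x && decide (x ∈ rem)) = rem.filter p := by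
  intro md rem hsub
  induction hsub with
  | slnil => intro _; rfl
  | @cons l₁ l₂ a h ih =>
    intro hnd
    have ha : a ∉ l₁ := fun hmem => (List.nodup_cons.mp hnd).1 (h.subset hmem)
    rw [List.filter_cons]
    simp only [ha, decide_false, Bool.and_false]
    exact ih (List.nodup_cons.mp hnd).2
  | @cons₂ l₁ l₂ a h ih =>
    intro hnd
    have hanot : a ∉ l₂ := (List.nodup_cons.mp hnd).1
    have hcong : l₂.filter (fun x => p x && decide (x ∈ a :: l₁))
        = l₂.filter (fun x => p x && decide (x ∈ l₁)) := by
      apply List.filter_congr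
      intro x hx
      have : x ≠ a := fun hxa => hanot (hxa ▸ hx)
      simp [List.mem_cons, this]
    rw [List.filter_cons, List.filter_cons, hcong, ih (List.nodup_cons.mp hnd).2]
    simp only [List.mem_cons, true_or, decide_true, Bool.and_true]

-- Every entry produced by lcGo comes from its entry list.
lemma lcGo_subset : ∀ (cs : List String) (entries : List (String × String)),
    ∀ kv ∈ lcGo cs entries, kv ∈ entries := by
  intro cs
  induction cs with
  | nil => intro entries kv h; cases h
  | cons c rest ih =>
    intro entries kv h
    rcases List.mem_append.mp h with h | h
    · exact List.mem_of_mem_filter h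
    · exact List.mem_of_mem_filter (ih _ kv h)

-- lcGo preserves key uniqueness: the hit block and the recursive misses have disjoint keys.
lemma lcGo_keys_nodup : ∀ (cs : List String) (entries : List (String × String)),
    (entries.map Prod.fst).Nodup → ((lcGo cs entries).map Prod.fst).Nodup := by
  intro cs
  induction cs with
  | nil => intro entries _; simp [lcGo]
  | cons c rest ih =>
    intro entries hnd
    have hend : entries.Nodup := List.Nodup.of_map _ hnd
    simp only [lcGo, List.map_append]
    refine List.Nodup.append ?_ ?_ ?_
    · exact List.Nodup.sublist (List.Sublist.map Prod.fst List.filter_sublist) hnd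
    · exact ih _ (List.Nodup.sublist (List.Sublist.map Prod.fst List.filter_sublist) hnd)
    · intro a ha hamem
      obtain ⟨kv, hkvh, rfl⟩ := List.mem_map.mp ha
      obtain ⟨kv', hkv'g, heq⟩ := List.mem_map.mp hamem
      have hkv'm : kv' ∈ entries.filter (fun kv => !PySem.Str.isIn c kv.1) :=
        lcGo_subset rest _ kv' hkv'g
      have hkveq : kv' = kv :=
        List.inj_on_of_nodup_map hnd (List.mem_of_mem_filter hkv'm)
          (List.mem_of_mem_filter hkvh) heq
      have h1 : PySem.Str.isIn c kv.1 = true := by simpa using List.of_mem_filter hkvh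
      have h2 : (!PySem.Str.isIn c kv'.1) = true := (List.mem_filter.mp hkv'm).2
      rw [hkveq, h1] at h2
      cases h2

-- Main alignment: A's comps-outer rescan fold appends, onto d.items, exactly B's lcGo of the
-- still-unseen entries, under the worklist invariant.
lemma fold_items_eq_go (md : List (String × String)) (hmd : (md.map Prod.fst).Nodup) :
    ∀ (comps : List String) (d : PySem.Dict String String) (rem : List (String × String)),
    d.keys.Nodup → rem.Sublist md →
    (∀ kv ∈ md, (kv ∈ rem → d.contains kv.1 = false) ∧ (kv ∉ rem → kv ∈ d.items)) →
    (List.foldl (fun updated_dict comp =>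
        List.foldl (fun updated_dict kv =>
          if PySem.Str.isIn comp kv.1 then updated_dict.insert kv.1 kv.2 else updated_dict)
          updated_dict md) d comps).items
    = d.items ++ lcGo comps rem := by
  intro comps
  induction comps with
  | nil => intro d rem _ _ _; simp [lcGo]
  | cons c cs ih =>
    intro d rem hd hsub hinv
    have hmdnd : md.Nodup := List.Nodup.of_map _ hmd
    have hcond : ∀ kv ∈ md, PySem.Str.isIn c kv.1 = true →
        kv ∈ d.items ∨ d.contains kv.1 = false := by
      intro kv hkv _
      by_cases hr : kv ∈ rem
      · exact Or.inr ((hinv kv hkv).1 hr)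
      · exact Or.inl ((hinv kv hkv).2 hr)
    have hfc : md.filter (fun kv => PySem.Str.isIn c kv.1 && !(d.contains kv.1))
        = rem.filter (fun kv => PySem.Str.isIn c kv.1) := by
      have h1 : md.filter (fun kv => PySem.Str.isIn c kv.1 && !(d.contains kv.1))
          = md.filter (fun kv => PySem.Str.isIn c kv.1 && decide (kv ∈ rem)) := by
        apply List.filter_congr
        intro kv hkv
        by_cases hr : kv ∈ rem
        · rw [(hinv kv hkv).1 hr]; simp [hr]
        · have hct : d.contains kv.1 = true :=
            (PySem.Dict.contains_iff_mem_keys d kv.1).mpr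
              (PySem.Dict.mem_keys_of_mem_items d ((hinv kv hkv).2 hr))
          rw [hct]; simp [hr]
      rw [h1, filter_mem_sublist _ md rem hsub hmdnd]
    -- facts about the hit block
    have hmsub : (rem.filter (fun kv => PySem.Str.isIn c kv.1)).Sublist md :=
      List.Sublist.trans List.filter_sublist hsub
    have hmnd : ((rem.filter (fun kv => PySem.Str.isIn c kv.1)).map Prod.fst).Nodup :=
      List.Nodup.sublist (List.Sublist.map Prod.fst hmsub) hmd
    have hmfresh : ∀ kv ∈ rem.filter (fun kv => PySem.Str.isIn c kv.1),
        d.contains kv.1 = false := by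
      intro kv hkv
      exact (hinv kv (hmsub.subset hkv)).1 (List.mem_of_mem_filter hkv)
    set matched := rem.filter (fun kv => PySem.Str.isIn c kv.1) with hmatched
    set d1 := List.foldl (fun updated kv => PySem.Dict.insert updated kv.1 kv.2) d matched with hd1def
    have hitems : d1.items = d.items ++ matched := by
      rw [hd1def, PySem.Dict.items_foldl_insert_fresh matched Prod.fst Prod.snd d hmfresh hmnd]
      simp
    have hkeys1 : d1.keys = d.keys ++ matched.map Prod.fst := by
      simp only [PySem.Dict.keys, hitems, List.map_append]
    have hd1 : d1.keys.Nodup := by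
      rw [hkeys1]
      refine List.Nodup.append hd hmnd ?_
      intro a ha hamem
      obtain ⟨kv, hkvm, rfl⟩ := List.mem_map.mp hamem
      have hcf := hmfresh kv hkvm
      have hct : d.contains kv.1 = true := (PySem.Dict.contains_iff_mem_keys d kv.1).mpr ha
      rw [hcf] at hct; cases hct
    have hsub' : (rem.filter (fun kv => !PySem.Str.isIn c kv.1)).Sublist md :=
      List.Sublist.trans List.filter_sublist hsub
    have hinv' : ∀ kv ∈ md,
        (kv ∈ rem.filter (fun kv => !PySem.Str.isIn c kv.1) → d1.contains kv.1 = false) ∧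
        (kv ∉ rem.filter (fun kv => !PySem.Str.isIn c kv.1) → kv ∈ d1.items) := by
      intro kv hkv
      constructor
      · intro hr'
        have hrrem : kv ∈ rem := List.mem_of_mem_filter hr'
        have hni : PySem.Str.isIn c kv.1 = false := by
          have := List.of_mem_filter hr'
          simpa using this
        cases hc1 : d1.contains kv.1
        · rfl
        · exfalso
          have hkmem := (PySem.Dict.contains_iff_mem_keys d1 kv.1).mp hc1
          rw [hkeys1] at hkmem
          rcases List.mem_append.mp hkmem with h | h
          · have hcf := (hinv kv hkv).1 hrrem
            have hct : d.contains kv.1 = true := (PySem.Dict.contains_iff_mem_keys d kv.1).mpr h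
            rw [hcf] at hct; cases hct
          · obtain ⟨kv', hkv'm, heq⟩ := List.mem_map.mp h
            have hkv'md : kv' ∈ md := hmsub.subset hkv'm
            have hkveq : kv' = kv := List.inj_on_of_nodup_map hmd hkv'md hkv heq
            rw [hkveq] at hkv'm
            have := List.of_mem_filter hkv'm
            rw [hni] at this; cases this
      · intro hnr'
        by_cases hr : kv ∈ rem
        · have hi : PySem.Str.isIn c kv.1 = true := by
            cases h : PySem.Str.isIn c kv.1
            · exact absurd (List.mem_filter.mpr ⟨hr, by rw [h]; rfl⟩) hnr'
            · rfl
          have hm : kv ∈ matched := List.mem_filter.mpr ⟨hr, hi⟩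
          rw [hitems]; exact List.mem_append_right _ hm
        · rw [hitems]; exact List.mem_append_left _ ((hinv kv hkv).2 hr)
    calc (List.foldl _ d (c :: cs)).items
        = (List.foldl (fun updated_dict comp =>
            List.foldl (fun updated_dict kv =>
              if PySem.Str.isIn comp kv.1 then updated_dict.insert kv.1 kv.2 else updated_dict)
              updated_dict md)
            (List.foldl (fun d kv =>
              if PySem.Str.isIn c kv.1 then d.insert kv.1 kv.2 else d) d md) cs).items := rfl
      _ = d.items ++ lcGo (c :: cs) rem := by
          rw [foldl_insert_pass c md d hmd hd hcond, hfc]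
          rw [ih d1 (rem.filter (fun kv => !PySem.Str.isIn c kv.1)) hd1 hsub' hinv']
          rw [hitems]
          simp only [lcGo, hmatched, List.append_assoc]

-- Rebuilding a dict from an assoc list with unique keys returns exactly that list.
lemma items_ofList_nodup (l : List (String × String)) (hnd : (l.map Prod.fst).Nodup) :
    (PySem.Dict.ofList l).items = l := by
  show ((PySem.Dict.empty : PySem.Dict String String).update l).items = l
  unfold PySem.Dict.update
  have h := PySem.Dict.items_foldl_insert_fresh l Prod.fst Prod.snd
    (PySem.Dict.empty : PySem.Dict String String)
    (fun a _ => PySem.Dict.contains_empty a.1) hnd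
  simpa using h

-- ===== VERDICT (by name: the statement is the Claim_ definition above) =====
theorem load_components_spec : Claim_equal_load_components := by
  intro comps model_dicts _ hpre
  unfold Spec_load_components load_components load_components_alt
  by_cases h : comps.contains "all" = true
  · rw [if_pos h, if_pos h]
  · simp only [h]
    rw [fold_items_eq_go model_dicts hpre comps PySem.Dict.empty model_dicts
      PySem.Dict.nodup_keys_empty (List.Sublist.refl model_dicts) ?_]
    · rw [items_ofList_nodup _ (lcGo_keys_nodup comps model_dicts hpre)]
      simp [PySem.Dict.empty]
    · intro kv hkv
      exact ⟨fun _ => PySem.Dict.contains_empty kv.1, fun hn => absurd hkv hn⟩
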